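-- pv_equiv track=rewrite | github.com/pypi-data/pypi-mirror-199 | packages/ez-parse/ez-parse-0.1.1.tar.gz/ez-parse-0.1.1/Resume-Parser/parser.py | get_certifications
-- ===== SOURCE A (Python) =====
-- TAGS = {
--     "Contact",
--     "Top Skills",
--     "Certifications",
--     "Honors-Awards",
--     "Publications",
--     "Summary",
--     "Languages",
--     "Experience",
--     "Education",
-- }
--
-- def get_certifications(result_list, i):
--     certifications = []
--     for j in range(i + 1, len(result_list)):
--         if len(result_list[j]) == 0:
--             continue
--         elif "Page" in result_list[j]:
--             continue
--         elif result_list[j] not in TAGS: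
--             certifications.append(result_list[j].strip())
--         else:
--             return certifications, j + 1
-- ===== SOURCE B (Python) =====
-- TAGS = {
--     "Contact",
--     "Top Skills",
--     "Certifications",
--     "Honors-Awards",
--     "Publications",
--     "Summary",
--     "Languages",
--     "Experience",
--     "Education",
-- }
--
-- def get_certifications(result_list, i):
--     # Locate the boundary first, then filter the lines before it in one comprehension.
--     n = len(result_list)
--     for j in range(i + 1, n):
--         if result_list[j] in TAGS:
--             certs = [result_list[k].strip() for k in range(i + 1, j)
--                      if len(result_list[k]) != 0 and "Page" not in result_list[k]]
--             return certs, j + 1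
--     return None
-- ===== Notes on version B (the rewrite author's own statement) =====
-- stated objective: simpler
-- what changed: A fuses boundary detection and filtering in one loop with an accumulator; B first locates the next TAG line (jstop) and then builds the certification list with a single comprehension over the indices before it.
import Mathlib
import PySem

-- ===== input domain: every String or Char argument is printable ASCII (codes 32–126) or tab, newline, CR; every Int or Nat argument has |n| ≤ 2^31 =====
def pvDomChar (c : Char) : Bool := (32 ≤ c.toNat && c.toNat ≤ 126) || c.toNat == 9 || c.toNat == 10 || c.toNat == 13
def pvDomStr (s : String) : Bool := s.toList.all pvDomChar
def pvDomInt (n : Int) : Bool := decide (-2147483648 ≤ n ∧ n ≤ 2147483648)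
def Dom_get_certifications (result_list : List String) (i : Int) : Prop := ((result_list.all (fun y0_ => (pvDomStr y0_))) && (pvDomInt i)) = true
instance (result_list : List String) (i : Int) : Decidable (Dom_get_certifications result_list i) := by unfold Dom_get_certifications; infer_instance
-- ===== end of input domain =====

-- B locates the boundary TAG first, then filters the lines before it in one pass; same cost, plainer decomposition.

def TAGS : PySem.Set String :=
  PySem.Set.ofList ["Contact", "Top Skills", "Certifications", "Honors-Awards",
    "Publications", "Summary", "Languages", "Experience", "Education"]

-- ===== PORT A =====
-- A's fused loop: walk the index range carrying the accumulated certifications.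
def getA_loop (rl : List String) : List Int → List String → Option (List String × Int)
  | [], _ => none
  | j :: rest, certs =>
    let s := PySem.List.pyGetD rl j ""
    if PySem.Str.len s = 0 then getA_loop rl rest certs
    else if PySem.Str.isIn "Page" s then getA_loop rl rest certs
    else if ¬ TAGS.contains s then getA_loop rl rest (certs ++ [PySem.Str.strip s])
    else some (certs, j + 1)

def get_certifications (result_list : List String) (i : Int) : Option (List String × Int) :=
  getA_loop result_list (PySem.List.pyRange (i + 1) (result_list.length : Int) 1) []

-- ===== PORT B =====
-- B's boundary search: first index j in the range with result_list[j] in TAGS.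
def getB_find (rl : List String) : List Int → Option Int
  | [] => none
  | j :: rest =>
    if TAGS.contains (PySem.List.pyGetD rl j "") then some j else getB_find rl rest

def get_certifications_alt (result_list : List String) (i : Int) : Option (List String × Int) :=
  match getB_find result_list (PySem.List.pyRange (i + 1) (result_list.length : Int) 1) with
  | none => none
  | some j =>
    some (((PySem.List.pyRange (i + 1) j 1).filter (fun k =>
              let s := PySem.List.pyGetD result_list k ""
              PySem.Str.len s ≠ 0 ∧ ¬ PySem.Str.isIn "Page" s)).map
            (fun k => PySem.Str.strip (PySem.List.pyGetD result_list k "")), j + 1)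

-- ===== PRECONDITION & SPEC =====
-- Pre_ excludes exactly the inputs where Python raises IndexError (a negative index below -len
-- is reached by both A and B): i + 1 must not lie below -len(result_list).
def Pre_get_certifications (result_list : List String) (i : Int) : Prop :=
  -(result_list.length : Int) ≤ i + 1
instance (result_list : List String) (i : Int) : Decidable (Pre_get_certifications result_list i) := by
  unfold Pre_get_certifications; infer_instance

def pvWitness_get_certifications : List String × Int :=
  (["Summary", "is", "", "Page 1", " x ", "Education", "tail"], 0)

def Spec_get_certifications (result_list : List String) (i : Int) (out : Option (List String × Int)) : Prop :=
  out = get_certifications_alt result_list i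
instance (result_list : List String) (i : Int) (out : Option (List String × Int)) : Decidable (Spec_get_certifications result_list i out) := by
  unfold Spec_get_certifications; infer_instance

-- ===== CLAIM (what is proved, stated in full; the proofs are below) =====
def Claim_equal_get_certifications : Prop := ∀ (result_list : List String) (i : Int), Dom_get_certifications result_list i → Pre_get_certifications result_list i → Spec_get_certifications result_list i (get_certifications result_list i)

-- ===== LEMMAS AND PROOFS =====

-- Every TAG is nonempty and contains no "Page".
theorem tags_filter {s : String} (h : s ∈ TAGS) :
    s ≠ "" ∧ PySem.Chars.isIn ['P', 'a', 'g', 'e'] s.toList = false := by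
  have hT : TAGS = ["Contact", "Top Skills", "Certifications", "Honors-Awards",
      "Publications", "Summary", "Languages", "Experience", "Education"] := by decide
  rw [hT] at h
  simp only [List.mem_cons, List.not_mem_nil, or_false] at h
  rcases h with rfl | rfl | rfl | rfl | rfl | rfl | rfl | rfl | rfl <;> decide

theorem getB_find_mem {rl : List String} {L : List Int} {j : Int}
    (h : getB_find rl L = some j) : j ∈ L := by
  induction L with
  | nil => simp [getB_find] at h
  | cons a rest ih =>
    unfold getB_find at h
    split at h
    · exact (Option.some.inj h) ▸ List.mem_cons_self
    · exact List.mem_cons_of_mem _ (ih h)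

theorem main_lemma (rl : List String) (n : Int) :
    ∀ (m : Nat) (a : Int), (n - a).toNat = m → ∀ certs : List String,
    getA_loop rl (PySem.List.pyRange a n 1) certs =
      match getB_find rl (PySem.List.pyRange a n 1) with
      | none => none
      | some j =>
        some (certs ++ ((PySem.List.pyRange a j 1).filter (fun k =>
                let s := PySem.List.pyGetD rl k ""
                PySem.Str.len s ≠ 0 ∧ ¬ PySem.Str.isIn "Page" s)).map
              (fun k => PySem.Str.strip (PySem.List.pyGetD rl k "")), j + 1) := by
  intro m
  induction m with
  | zero =>
    intro a ha certs
    have hna : n ≤ a := by omega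
    rw [PySem.List.pyRange_one_eq_nil hna]
    simp [getA_loop, getB_find]
  | succ m ih =>
    intro a ha certs
    have han : a < n := by omega
    rw [PySem.List.pyRange_one_cons han]
    set s := PySem.List.pyGetD rl a "" with hs
    by_cases htag : s ∈ TAGS
    · -- boundary found at a: A returns; B finds jstop = a, empty slice
      obtain ⟨h1, h2⟩ := tags_filter htag
      have hA : getA_loop rl (a :: PySem.List.pyRange (a+1) n 1) certs = some (certs, a + 1) := by
        simp [getA_loop, ← hs, htag, h1, h2]
      have hB : getB_find rl (a :: PySem.List.pyRange (a+1) n 1) = some a := by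
        simp [getB_find, ← hs, htag]
      rw [hA, hB]
      simp [PySem.List.pyRange_one_eq_nil (le_refl a)]
    · -- not a tag: B's search skips a
      have hB : getB_find rl (a :: PySem.List.pyRange (a+1) n 1)
          = getB_find rl (PySem.List.pyRange (a+1) n 1) := by
        simp [getB_find, ← hs, htag]
      have hrec := ih (a + 1) (by omega)
      by_cases h1 : s = ""
      · -- empty line: both skip it
        have hA : getA_loop rl (a :: PySem.List.pyRange (a+1) n 1) certs
            = getA_loop rl (PySem.List.pyRange (a+1) n 1) certs := by
          simp [getA_loop, ← hs, h1]
        rw [hA, hB, hrec certs]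
        cases hfind : getB_find rl (PySem.List.pyRange (a+1) n 1) with
        | none => rfl
        | some j =>
          have hj : a < j := by
            have := (PySem.List.mem_pyRange_one.1 (getB_find_mem hfind)).1; omega
          simp [PySem.List.pyRange_one_cons hj, ← hs, h1]
      · by_cases h2 : PySem.Chars.isIn ['P', 'a', 'g', 'e'] s.toList = true
        · -- "Page" line: both skip it
          have hA : getA_loop rl (a :: PySem.List.pyRange (a+1) n 1) certs
              = getA_loop rl (PySem.List.pyRange (a+1) n 1) certs := by
            simp [getA_loop, ← hs, h1, h2]
          rw [hA, hB, hrec certs]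
          cases hfind : getB_find rl (PySem.List.pyRange (a+1) n 1) with
          | none => rfl
          | some j =>
            have hj : a < j := by
              have := (PySem.List.mem_pyRange_one.1 (getB_find_mem hfind)).1; omega
            simp [PySem.List.pyRange_one_cons hj, ← hs, h2]
        · -- ordinary line: A appends its strip; B's filter keeps it
          have hA : getA_loop rl (a :: PySem.List.pyRange (a+1) n 1) certs
              = getA_loop rl (PySem.List.pyRange (a+1) n 1) (certs ++ [PySem.Str.strip s]) := by
            simp [getA_loop, ← hs, h1, h2, htag]
          rw [hA, hB, hrec (certs ++ [PySem.Str.strip s])]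
          cases hfind : getB_find rl (PySem.List.pyRange (a+1) n 1) with
          | none => rfl
          | some j =>
            have hj : a < j := by
              have := (PySem.List.mem_pyRange_one.1 (getB_find_mem hfind)).1; omega
            simp [PySem.List.pyRange_one_cons hj, ← hs, h1, h2]

-- ===== VERDICT (by name: the statement is the Claim_ definition above) =====
theorem get_certifications_spec : Claim_equal_get_certifications := by
  intro rl i _ _
  unfold Spec_get_certifications get_certifications get_certifications_alt
  rw [main_lemma rl (rl.length : Int) ((rl.length : Int) - (i + 1)).toNat (i + 1) rfl []]
  cases getB_find rl (PySem.List.pyRange (i + 1) (rl.length : Int) 1) <;> simp
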